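-- pv_equiv track=rewrite | github.com/jcraig949jfi/Prometheus | noesis/the_maths/nim_theory.py | nimber_multiply
-- ===== SOURCE A (Python) =====
-- def nimber_multiply(x):
--     """Nimber multiplication of two values x[0]*x[1]. Input: array. Output: integer."""
--     a = int(abs(x[0]))
--     b = int(abs(x[1]))
--
--     def _nim_mult(a, b):
--         if a <= 1 or b <= 1:
--             return a * b
--         # Find highest power of 2 in bit length
--         a_bits = a.bit_length() - 1
--         b_bits = b.bit_length() - 1
--         # Use recursive definition based on Fermat 2-powers
--         # For small values, compute directly via table
--         if a < 4 and b < 4: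
--             # Nimber multiplication table for {0,1,2,3}
--             table = [[0, 0, 0, 0],
--                      [0, 1, 2, 3],
--                      [0, 2, 3, 1],
--                      [0, 3, 1, 2]]
--             return table[a][b]
--         # General case: decompose and recurse
--         # Find D = highest Fermat 2-power <= max(a,b)
--         D_exp = 1
--         while (1 << (1 << D_exp)) <= max(a, b):
--             D_exp += 1
--         D_exp -= 1
--         D = 1 << (1 << D_exp)  # 2^(2^D_exp)
--
--         ah, al = a >> (1 << D_exp), a & (D - 1)
--         bh, bl = b >> (1 << D_exp), b & (D - 1)
--
--         c = _nim_mult(ah, bh)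
--         d = _nim_mult(al, bl)
--         e = _nim_mult(ah ^ al, bh ^ bl)
--         f = _nim_mult(c, D >> 1)  # c * (D/2) in nimber arithmetic
--
--         return ((e ^ d) << (1 << D_exp)) ^ (f ^ d)
--
--     return int(_nim_mult(a, b))
-- ===== SOURCE B (Python) =====
-- def nimber_multiply(x):
--     """Nimber multiplication of two values x[0]*x[1]. Input: array. Output: integer."""
--     a = int(abs(x[0]))
--     b = int(abs(x[1]))
--
--     def nmul(k, a, b):
--         # nimber product of a, b < 2^(2^k), by a fixed full Fermat-power tower
--         # (schoolbook cross products, no Karatsuba trick, no table, no search loop)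
--         if k == 0:
--             return a * b
--         s = 1 << (k - 1)
--         D = 1 << s
--         ah, al = a >> s, a & (D - 1)
--         bh, bl = b >> s, b & (D - 1)
--         c = nmul(k - 1, ah, bh)
--         g = nmul(k - 1, ah, bl)
--         h = nmul(k - 1, al, bh)
--         d = nmul(k - 1, al, bl)
--         f = nmul(k - 1, c, D >> 1)
--         return ((c ^ g ^ h) << s) ^ f ^ d
--
--     k = (max(a, b).bit_length() - 1).bit_length()
--     return int(nmul(k, a, b))
-- ===== Notes on version B (the rewrite author's own statement) =====
-- stated objective: alternative
-- what changed: B replaces A's adaptive value recursion (early exits, hard-coded 4x4 nimber table, per-call while-loop search for the largest Fermat 2-power, Karatsuba-style 3-product combine) by a structural recursion on a level counter over a fixed full Fermat-power tower using plain schoolbook cross products, with ordinary integer multiplication of single bits at the leaves.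
import Mathlib
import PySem

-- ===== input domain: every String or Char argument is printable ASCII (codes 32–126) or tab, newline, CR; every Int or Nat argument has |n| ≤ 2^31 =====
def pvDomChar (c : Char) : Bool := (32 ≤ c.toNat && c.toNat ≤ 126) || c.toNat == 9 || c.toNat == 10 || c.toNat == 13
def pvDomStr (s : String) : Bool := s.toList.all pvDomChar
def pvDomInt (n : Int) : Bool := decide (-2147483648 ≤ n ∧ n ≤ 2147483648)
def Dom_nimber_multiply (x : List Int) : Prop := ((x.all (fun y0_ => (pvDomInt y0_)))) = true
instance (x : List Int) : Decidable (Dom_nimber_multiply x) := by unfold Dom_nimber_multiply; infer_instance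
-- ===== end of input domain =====

-- B replaces A's adaptive recursion (early exits, 4×4 table, per-call search loop for the
-- largest Fermat power, Karatsuba 3-product combine) by a fixed full Fermat tower recursing
-- on a level counter with schoolbook cross products; objective: alternative (not faster).

-- ===== PORT A =====
-- the nimber multiplication table for {0,1,2,3}
def pyTableA : List (List Nat) := [[0, 0, 0, 0], [0, 1, 2, 3], [0, 2, 3, 1], [0, 3, 1, 2]]

-- A's 'while (1 << (1 << D_exp)) <= max(a, b): D_exp += 1' loop; fuel only makes it total
def dExpLoopA (fuel : Nat) (e : Nat) (m : Nat) : Nat :=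
  match fuel with
  | 0 => e
  | fuel + 1 => if (1 <<< (1 <<< e)) ≤ m then dExpLoopA fuel (e + 1) m else e

-- A's inner recursive _nim_mult; fuel (max a b + 1 at top) only makes the recursion total:
-- every recursive call strictly decreases max of the arguments (proved in the lemmas below)
def nimMultA (fuel : Nat) (a b : Nat) : Nat :=
  match fuel with
  | 0 => 0  -- fuel guard, never reached for the fuel supplied by nimber_multiply
  | fuel + 1 =>
    if a ≤ 1 ∨ b ≤ 1 then a * b
    -- (a_bits, b_bits of the source are computed but never used; omitted)
    else if a < 4 ∧ b < 4 then (pyTableA.getD a []).getD b 0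
    else
      let E := dExpLoopA (max a b) 1 (max a b) - 1
      let s := 1 <<< E
      let D := 1 <<< s
      let ah := a >>> s
      let al := a &&& (D - 1)
      let bh := b >>> s
      let bl := b &&& (D - 1)
      let c := nimMultA fuel ah bh
      let d := nimMultA fuel al bl
      let e := nimMultA fuel (ah ^^^ al) (bh ^^^ bl)
      let f := nimMultA fuel c (D >>> 1)
      ((e ^^^ d) <<< s) ^^^ (f ^^^ d)

def nimber_multiply (x : List Int) : Int :=
  match PySem.List.pyGet? x 0, PySem.List.pyGet? x 1 with
  | some x0, some x1 =>
    let a := x0.natAbs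
    let b := x1.natAbs
    Int.ofNat (nimMultA (max a b + 1) a b)
  | _, _ => 0  -- IndexError in Python: excluded by Pre_

-- ===== PORT B =====
-- B's nmul: nimber product of a, b < 2^(2^k) by structural recursion on the level k
def nmulB (k : Nat) (a b : Nat) : Nat :=
  match k with
  | 0 => a * b
  | k + 1 =>
    let s := 1 <<< k
    let D := 1 <<< s
    let ah := a >>> s
    let al := a &&& (D - 1)
    let bh := b >>> s
    let bl := b &&& (D - 1)
    let c := nmulB k ah bh
    let g := nmulB k ah bl
    let h := nmulB k al bh
    let d := nmulB k al bl
    let f := nmulB k c (D >>> 1)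
    ((c ^^^ g ^^^ h) <<< s) ^^^ f ^^^ d

def nimber_multiply_alt (x : List Int) : Int :=
  match PySem.List.pyGet? x 0 with
  | none => 0
  | some x0 =>
    match PySem.List.pyGet? x 1 with
    | none => 0
    | some x1 =>
      let a := x0.natAbs
      let b := x1.natAbs
      -- '(max(a, b).bit_length() - 1).bit_length()'; bit_length ported as Nat.size
      let k := (Nat.size (max a b) - 1).size
      Int.ofNat (nmulB k a b)

-- ===== PRECONDITION & SPEC =====
-- Python A raises IndexError when x has fewer than two elements; that is all Pre_ excludes.
def Pre_nimber_multiply (x : List Int) : Prop := 2 ≤ x.length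
instance (x : List Int) : Decidable (Pre_nimber_multiply x) := by
  unfold Pre_nimber_multiply; infer_instance

def pvWitness_nimber_multiply : List Int := [6, 7]

def Spec_nimber_multiply (x : List Int) (out : Int) : Prop := out = nimber_multiply_alt x
instance (x : List Int) (out : Int) : Decidable (Spec_nimber_multiply x out) := by
  unfold Spec_nimber_multiply; infer_instance

-- ===== CLAIM (what is proved, stated in full; the proofs are below) =====
def Claim_equal_nimber_multiply : Prop :=
  ∀ (x : List Int), Dom_nimber_multiply x → Pre_nimber_multiply x →
    Spec_nimber_multiply x (nimber_multiply x)

-- ===== LEMMAS AND PROOFS =====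

-- ---- generic bit-manipulation facts ----
theorem pv_xor_shiftRight (a b s : Nat) : (a ^^^ b) >>> s = (a >>> s) ^^^ (b >>> s) := by
  apply Nat.eq_of_testBit_eq; intro i
  simp [Nat.testBit_shiftRight, Nat.testBit_xor]

theorem pv_xor_shiftLeft (a b s : Nat) : (a ^^^ b) <<< s = (a <<< s) ^^^ (b <<< s) := by
  apply Nat.eq_of_testBit_eq; intro i
  simp [Nat.testBit_shiftLeft, Nat.testBit_xor, Bool.and_xor_distrib_left]

theorem pv_join (b s : Nat) : ((b >>> s) <<< s) ^^^ (b &&& (2 ^ s - 1)) = b := by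
  apply Nat.eq_of_testBit_eq; intro i
  simp only [Nat.testBit_xor, Nat.testBit_shiftLeft, Nat.testBit_shiftRight, Nat.testBit_and,
    Nat.testBit_two_pow_sub_one]
  rcases Nat.lt_or_ge i s with h | h
  · simp [h, Nat.not_le.mpr h]
  · simp [h, Nat.not_lt.mpr h, Nat.add_sub_cancel' h]

theorem pv_shiftRight_lt {a s : Nat} (h : a < 2 ^ (2 * s)) : a >>> s < 2 ^ s := by
  rw [Nat.shiftRight_eq_div_pow]
  apply Nat.div_lt_of_lt_mul
  calc a < 2 ^ (2 * s) := h
    _ = 2 ^ s * 2 ^ s := by rw [two_mul, pow_add]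

theorem pv_and_mask_lt (a s : Nat) : a &&& (2 ^ s - 1) < 2 ^ s := by
  rw [Nat.and_two_pow_sub_one_eq_mod]
  exact Nat.mod_lt _ (Nat.two_pow_pos s)

theorem pv_half_lt (s : Nat) : 2 ^ s >>> 1 < 2 ^ s := by
  rw [Nat.shiftRight_eq_div_pow, pow_one]
  exact Nat.div_lt_self (Nat.two_pow_pos _) one_lt_two

theorem pv_m_lt (m : Nat) : m < 2 ^ (2 ^ m) :=
  lt_of_lt_of_le Nat.lt_two_pow_self
    (Nat.pow_le_pow_right (by norm_num) Nat.lt_two_pow_self.le)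

-- ---- loop characterizations ----
theorem pv_size_bound (m : Nat) : m < 2 ^ 2 ^ (Nat.size m - 1).size := by
  apply lt_of_lt_of_le (Nat.lt_size_self m)
  apply Nat.pow_le_pow_right (by norm_num)
  rcases Nat.eq_zero_or_pos (Nat.size m) with h | h
  · simp [h]
  · have := Nat.lt_size_self (Nat.size m - 1)
    omega

theorem dExpLoopA_gt : ∀ (fuel e m : Nat), m < 2 ^ (2 ^ (e + fuel)) →
    m < 2 ^ (2 ^ (dExpLoopA fuel e m)) := by
  intro fuel
  induction fuel with
  | zero => intro e m h; simpa [dExpLoopA] using h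
  | succ n ih =>
    intro e m h
    rw [dExpLoopA]
    split
    · exact ih (e + 1) m (by rw [show e + 1 + n = e + (n + 1) by omega]; exact h)
    · rename_i hcond
      rw [Nat.one_shiftLeft, Nat.one_shiftLeft] at hcond
      omega

theorem dExpLoopA_low : ∀ (fuel e m : Nat), 1 ≤ e → 2 ^ (2 ^ (e - 1)) ≤ m →
    2 ^ (2 ^ (dExpLoopA fuel e m - 1)) ≤ m ∧ 1 ≤ dExpLoopA fuel e m := by
  intro fuel
  induction fuel with
  | zero => intro e m he h; exact ⟨by simpa [dExpLoopA] using h, by simpa [dExpLoopA] using he⟩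
  | succ n ih =>
    intro e m he h
    rw [dExpLoopA]
    split
    · rename_i hcond
      rw [Nat.one_shiftLeft, Nat.one_shiftLeft] at hcond
      exact ih (e + 1) m (by omega) (by simpa using hcond)
    · exact ⟨h, he⟩

-- ---- structural facts about nmulB ----
theorem nmulB_zero_left : ∀ (k b : Nat), nmulB k 0 b = 0 := by
  intro k
  induction k with
  | zero => intro b; simp [nmulB]
  | succ k ih => intro b; simp [nmulB, ih]

theorem nmulB_zero_right : ∀ (k a : Nat), nmulB k a 0 = 0 := by
  intro k
  induction k with
  | zero => intro a; simp [nmulB]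
  | succ k ih => intro a; simp [nmulB, ih, nmulB_zero_left]

theorem nmulB_one_left : ∀ (k b : Nat), nmulB k 1 b = b := by
  intro k
  induction k with
  | zero => intro b; simp [nmulB]
  | succ k ih =>
    intro b
    have hs : 1 ≤ 2 ^ k := Nat.one_le_two_pow
    have hlt : 1 < 2 ^ 2 ^ k :=
      lt_of_lt_of_le (by norm_num) (Nat.pow_le_pow_right (by norm_num) hs)
    have h1r : 1 >>> 2 ^ k = 0 := by
      rw [Nat.shiftRight_eq_div_pow]; exact Nat.div_eq_of_lt hlt
    have h1a : 1 &&& (2 ^ 2 ^ k - 1) = 1 := by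
      rw [Nat.and_two_pow_sub_one_eq_mod]; exact Nat.mod_eq_of_lt hlt
    simp only [nmulB, Nat.one_shiftLeft, h1r, h1a, nmulB_zero_left, ih,
      Nat.zero_xor, Nat.xor_zero]
    exact pv_join b (2 ^ k)

theorem nmulB_comm : ∀ (k a b : Nat), nmulB k a b = nmulB k b a := by
  intro k
  induction k with
  | zero => intro a b; simp [nmulB, Nat.mul_comm]
  | succ k ih =>
    intro a b
    simp only [nmulB, Nat.one_shiftLeft]
    rw [ih (a >>> 2 ^ k) (b >>> 2 ^ k),
        ih (a >>> 2 ^ k) (b &&& (2 ^ 2 ^ k - 1)),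
        ih (a &&& (2 ^ 2 ^ k - 1)) (b >>> 2 ^ k),
        ih (a &&& (2 ^ 2 ^ k - 1)) (b &&& (2 ^ 2 ^ k - 1))]
    congr 2
    simp only [Nat.xor_assoc]
    congr 1
    congr 1
    exact Nat.xor_comm _ _

theorem nmulB_closure : ∀ (k a b : Nat), a < 2 ^ (2 ^ k) → b < 2 ^ (2 ^ k) →
    nmulB k a b < 2 ^ (2 ^ k) := by
  intro k
  induction k with
  | zero =>
    intro a b ha hb
    simp only [pow_zero, pow_one] at *
    interval_cases a <;> interval_cases b <;> simp [nmulB]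
  | succ k ih =>
    intro a b ha hb
    have hdouble : (2 : Nat) ^ 2 ^ (k + 1) = 2 ^ (2 * 2 ^ k) := by ring_nf
    rw [hdouble] at ha hb ⊢
    have hah : a >>> 2 ^ k < 2 ^ 2 ^ k := pv_shiftRight_lt ha
    have hbh : b >>> 2 ^ k < 2 ^ 2 ^ k := pv_shiftRight_lt hb
    have hal : a &&& (2 ^ 2 ^ k - 1) < 2 ^ 2 ^ k := pv_and_mask_lt a (2 ^ k)
    have hbl : b &&& (2 ^ 2 ^ k - 1) < 2 ^ 2 ^ k := pv_and_mask_lt b (2 ^ k)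
    have hc := ih _ _ hah hbh
    have hg := ih _ _ hah hbl
    have hh := ih _ _ hal hbh
    have hd := ih _ _ hal hbl
    have hf := ih _ _ hc (pv_half_lt (2 ^ k))
    simp only [nmulB, Nat.one_shiftLeft]
    apply Nat.xor_lt_two_pow
    · apply Nat.xor_lt_two_pow
      · rw [Nat.shiftLeft_eq]
        calc _ < 2 ^ 2 ^ k * 2 ^ 2 ^ k :=
              Nat.mul_lt_mul_of_lt_of_le
                (Nat.xor_lt_two_pow (Nat.xor_lt_two_pow hc hg) hh) (le_refl _)
                (Nat.two_pow_pos _)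
          _ = 2 ^ (2 * 2 ^ k) := by ring
      · exact lt_of_lt_of_le hf (Nat.pow_le_pow_right (by norm_num) (by omega))
    · exact lt_of_lt_of_le hd (Nat.pow_le_pow_right (by norm_num) (by omega))

theorem nmulB_lift : ∀ (k a b : Nat), a < 2 ^ (2 ^ k) → b < 2 ^ (2 ^ k) →
    nmulB (k + 1) a b = nmulB k a b := by
  intro k a b ha hb
  have hs : a >>> 2 ^ k = 0 := by
    rw [Nat.shiftRight_eq_div_pow]; exact Nat.div_eq_of_lt ha
  have hs' : b >>> 2 ^ k = 0 := by
    rw [Nat.shiftRight_eq_div_pow]; exact Nat.div_eq_of_lt hb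
  have hm : a &&& (2 ^ 2 ^ k - 1) = a := by
    rw [Nat.and_two_pow_sub_one_eq_mod]; exact Nat.mod_eq_of_lt ha
  have hm' : b &&& (2 ^ 2 ^ k - 1) = b := by
    rw [Nat.and_two_pow_sub_one_eq_mod]; exact Nat.mod_eq_of_lt hb
  conv_lhs => rw [nmulB]
  simp [Nat.one_shiftLeft, hs, hs', hm, hm', nmulB_zero_left, nmulB_zero_right]

theorem nmulB_lift_le : ∀ (k' k a b : Nat), k ≤ k' → a < 2 ^ (2 ^ k) → b < 2 ^ (2 ^ k) →
    nmulB k' a b = nmulB k a b := by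
  intro k'
  induction k' with
  | zero =>
    intro k a b hk ha hb
    have : k = 0 := Nat.le_zero.mp hk
    rw [this]
  | succ k' ih =>
    intro k a b hk ha hb
    rcases Nat.lt_or_ge k (k' + 1) with h | h
    · have hk' : k ≤ k' := by omega
      have hle : (2 : Nat) ^ 2 ^ k ≤ 2 ^ 2 ^ k' :=
        Nat.pow_le_pow_right (by norm_num) (Nat.pow_le_pow_right (by norm_num) hk')
      rw [nmulB_lift k' a b (lt_of_lt_of_le ha hle) (lt_of_lt_of_le hb hle)]
      exact ih k a b hk' ha hb
    · have : k = k' + 1 := by omega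
      rw [this]

theorem nmulB_bilin_left : ∀ (k a a' b : Nat), a < 2 ^ (2 ^ k) → a' < 2 ^ (2 ^ k) →
    b < 2 ^ (2 ^ k) → nmulB k (a ^^^ a') b = nmulB k a b ^^^ nmulB k a' b := by
  intro k
  induction k with
  | zero =>
    intro a a' b ha ha' hb
    simp only [pow_zero, pow_one] at *
    interval_cases a <;> interval_cases a' <;> interval_cases b <;> rfl
  | succ k ih =>
    intro a a' b ha ha' hb
    have hdouble : (2 : Nat) ^ 2 ^ (k + 1) = 2 ^ (2 * 2 ^ k) := by ring_nf
    rw [hdouble] at ha ha' hb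
    have hah : a >>> 2 ^ k < 2 ^ 2 ^ k := pv_shiftRight_lt ha
    have hah' : a' >>> 2 ^ k < 2 ^ 2 ^ k := pv_shiftRight_lt ha'
    have hbh : b >>> 2 ^ k < 2 ^ 2 ^ k := pv_shiftRight_lt hb
    have hal : a &&& (2 ^ 2 ^ k - 1) < 2 ^ 2 ^ k := pv_and_mask_lt a (2 ^ k)
    have hal' : a' &&& (2 ^ 2 ^ k - 1) < 2 ^ 2 ^ k := pv_and_mask_lt a' (2 ^ k)
    have hbl : b &&& (2 ^ 2 ^ k - 1) < 2 ^ 2 ^ k := pv_and_mask_lt b (2 ^ k)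
    simp only [nmulB, Nat.one_shiftLeft, pv_xor_shiftRight, Nat.and_xor_distrib_right]
    rw [ih _ _ _ hah hah' hbh, ih _ _ _ hah hah' hbl, ih _ _ _ hal hal' hbh,
        ih _ _ _ hal hal' hbl,
        ih _ _ _ (nmulB_closure k _ _ hah hbh) (nmulB_closure k _ _ hah' hbh)
          (pv_half_lt (2 ^ k)),
        pv_xor_shiftLeft]
    simp only [pv_xor_shiftLeft]
    ac_rfl

theorem nmulB_bilin_right : ∀ (k a b b' : Nat), a < 2 ^ (2 ^ k) → b < 2 ^ (2 ^ k) →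
    b' < 2 ^ (2 ^ k) → nmulB k a (b ^^^ b') = nmulB k a b ^^^ nmulB k a b' := by
  intro k a b b' ha hb hb'
  rw [nmulB_comm, nmulB_bilin_left k b b' a hb hb' ha, nmulB_comm k b a, nmulB_comm k b' a]

-- ---- the main simulation: A's fuelled recursion computes nmulB at any sufficient level ----
theorem pv_combineA (c g h d f s : Nat) :
    ((((c ^^^ g) ^^^ (h ^^^ d)) ^^^ d) <<< s) ^^^ (f ^^^ d) =
      ((c ^^^ g ^^^ h) <<< s) ^^^ f ^^^ d := by
  have hcancel : ((c ^^^ g) ^^^ (h ^^^ d)) ^^^ d = c ^^^ g ^^^ h := by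
    rw [show ((c ^^^ g) ^^^ (h ^^^ d)) ^^^ d = (c ^^^ g ^^^ h) ^^^ (d ^^^ d) from by ac_rfl]
    simp
  rw [hcancel]
  exact (Nat.xor_assoc _ _ _).symm

theorem nimMultA_eq_nmulB : ∀ (fuel a b k : Nat), max a b < fuel →
    a < 2 ^ (2 ^ k) → b < 2 ^ (2 ^ k) → nimMultA fuel a b = nmulB k a b := by
  intro fuel
  induction fuel with
  | zero => intro a b k h _ _; omega
  | succ n ih =>
    intro a b k hfuel ha hb
    rw [nimMultA]
    split
    · rename_i hsmall
      rcases hsmall with h1 | h1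
      · interval_cases a
        · simp [nmulB_zero_left]
        · simp [nmulB_one_left]
      · interval_cases b
        · simp [nmulB_zero_right]
        · rw [nmulB_comm]; simp [nmulB_one_left]
    · split
      · -- table case: 2 ≤ a < 4, 2 ≤ b < 4
        rename_i hsmall htab
        push_neg at hsmall
        obtain ⟨ha2, hb2⟩ := hsmall
        obtain ⟨ha4, hb4⟩ := htab
        have hk1 : 1 ≤ k := by
          by_contra hcon
          have hk0 : k = 0 := by omega
          subst hk0
          norm_num at ha
          omega
        rw [nmulB_lift_le k 1 a b hk1 (by norm_num; omega) (by norm_num; omega)]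
        interval_cases a <;> interval_cases b <;> decide
      · -- general case
        rename_i hsmall htab
        push_neg at hsmall
        obtain ⟨ha2, hb2⟩ := hsmall
        have hm4 : 4 ≤ max a b := by
          rcases not_and_or.mp htab with hcon | hcon <;> (push_neg at hcon; omega)
        have hmn : max a b ≤ n := by omega
        set r := dExpLoopA (max a b) 1 (max a b) with hrdef
        have hmlt : max a b < 2 ^ 2 ^ (1 + max a b) :=
          lt_of_lt_of_le (pv_m_lt _)
            (Nat.pow_le_pow_right (by norm_num)
              (Nat.pow_le_pow_right (by norm_num) (by omega)))
        have hgt : max a b < 2 ^ 2 ^ r := dExpLoopA_gt (max a b) 1 (max a b) hmlt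
        have hlow : 2 ^ 2 ^ (r - 1) ≤ max a b ∧ 1 ≤ r :=
          dExpLoopA_low (max a b) 1 (max a b) (le_refl 1) (by norm_num; omega)
        have hr1 : r - 1 + 1 = r := Nat.sub_add_cancel hlow.2
        have hFn : 2 ^ 2 ^ (r - 1) ≤ n := le_trans hlow.1 hmn
        have h2r : (2 : Nat) ^ 2 ^ r = 2 ^ (2 * 2 ^ (r - 1)) := by
          have hexp : 2 ^ r = 2 * 2 ^ (r - 1) := by
            conv_lhs => rw [← hr1]
            rw [pow_succ, Nat.mul_comm]
          rw [hexp]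
        have haK : a < 2 ^ (2 * 2 ^ (r - 1)) := by
          rw [← h2r]; exact lt_of_le_of_lt (le_max_left a b) hgt
        have hbK : b < 2 ^ (2 * 2 ^ (r - 1)) := by
          rw [← h2r]; exact lt_of_le_of_lt (le_max_right a b) hgt
        have hah : a >>> 2 ^ (r - 1) < 2 ^ 2 ^ (r - 1) := pv_shiftRight_lt haK
        have hbh : b >>> 2 ^ (r - 1) < 2 ^ 2 ^ (r - 1) := pv_shiftRight_lt hbK
        have hal : a &&& (2 ^ 2 ^ (r - 1) - 1) < 2 ^ 2 ^ (r - 1) :=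
          pv_and_mask_lt a (2 ^ (r - 1))
        have hbl : b &&& (2 ^ 2 ^ (r - 1) - 1) < 2 ^ 2 ^ (r - 1) :=
          pv_and_mask_lt b (2 ^ (r - 1))
        have hc := ih _ _ (r - 1) (Nat.max_lt.mpr ⟨lt_of_lt_of_le hah hFn, lt_of_lt_of_le hbh hFn⟩) hah hbh
        have hd := ih _ _ (r - 1) (Nat.max_lt.mpr ⟨lt_of_lt_of_le hal hFn, lt_of_lt_of_le hbl hFn⟩) hal hbl
        have hxa : a >>> 2 ^ (r - 1) ^^^ a &&& (2 ^ 2 ^ (r - 1) - 1) < 2 ^ 2 ^ (r - 1) :=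
          Nat.xor_lt_two_pow hah hal
        have hxb : b >>> 2 ^ (r - 1) ^^^ b &&& (2 ^ 2 ^ (r - 1) - 1) < 2 ^ 2 ^ (r - 1) :=
          Nat.xor_lt_two_pow hbh hbl
        have he := ih _ _ (r - 1) (Nat.max_lt.mpr ⟨lt_of_lt_of_le hxa hFn, lt_of_lt_of_le hxb hFn⟩) hxa hxb
        have hcC : nmulB (r - 1) (a >>> 2 ^ (r - 1)) (b >>> 2 ^ (r - 1)) < 2 ^ 2 ^ (r - 1) :=
          nmulB_closure _ _ _ hah hbh
        have hhalf : 2 ^ 2 ^ (r - 1) >>> 1 < 2 ^ 2 ^ (r - 1) := pv_half_lt _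
        have hf := ih _ _ (r - 1) (Nat.max_lt.mpr ⟨lt_of_lt_of_le hcC hFn, lt_of_lt_of_le hhalf hFn⟩) hcC hhalf
        have hB : nmulB k a b = nmulB r a b := by
          rw [← nmulB_lift_le (max k r) k a b (le_max_left k r) ha hb,
              nmulB_lift_le (max k r) r a b (le_max_right k r)
                (by rw [h2r]; exact haK) (by rw [h2r]; exact hbK)]
        have hB2 : nmulB r a b = nmulB (r - 1 + 1) a b := by rw [hr1]
        rw [hB, hB2, nmulB]
        simp only [Nat.one_shiftLeft, hc, hd, he, hf]
        rw [nmulB_bilin_left (r - 1) _ _ _ hah hal hxb,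
            nmulB_bilin_right (r - 1) _ _ _ hah hbh hbl,
            nmulB_bilin_right (r - 1) _ _ _ hal hbh hbl]
        exact pv_combineA _ _ _ _ _ _

-- ===== VERDICT (by name: the statement is the Claim_ definition above) =====
theorem nimber_multiply_spec : Claim_equal_nimber_multiply := by
  unfold Claim_equal_nimber_multiply
  intro x hdom hpre
  unfold Pre_nimber_multiply at hpre
  unfold Spec_nimber_multiply
  match x, hpre with
  | x0 :: x1 :: rest, _ =>
    have h1 : PySem.List.pyGet? (x0 :: x1 :: rest) 1 = some x1 := by
      simp [PySem.List.pyGet?, PySem.List.pyIdx?]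
    simp only [nimber_multiply, nimber_multiply_alt, PySem.List.pyGet?_zero_cons, h1]
    congr 1
    apply nimMultA_eq_nmulB
    · exact Nat.lt_succ_self _
    · exact lt_of_le_of_lt (le_max_left _ _) (pv_size_bound (max x0.natAbs x1.natAbs))
    · exact lt_of_le_of_lt (le_max_right _ _) (pv_size_bound (max x0.natAbs x1.natAbs))
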